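-- pv_equiv track=rewrite | github.com/shishisizhu/continuous_neutrino | neutrino/language/ptx.py | cvt_inst
-- ===== SOURCE A (Python) =====
-- def filter_keyword(reg: str) -> str:
--     if reg in {"ADDR", "BYTES", "OUT", "IN1", "IN2", "IN3", "IN4"}:
--         return reg
--     elif isinstance(reg, int):
--         return reg
--     else:
--         return "%" + reg
--
-- def cvt_inst(inst: list[str]) -> str:
--     match inst[0]:
--         # ALU Instructions
--         case "add":
--             return f"add.u64 {filter_keyword(inst[1])}, {filter_keyword(inst[2])}, {filter_keyword(inst[3])};"
--         case "sub":
--             return f"sub.u64 {filter_keyword(inst[1])}, {filter_keyword(inst[2])}, {filter_keyword(inst[3])};"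
--         case "mul":
--             return f"mul.u64 {filter_keyword(inst[1])}, {filter_keyword(inst[2])}, {filter_keyword(inst[3])};"
--         case "div":
--             return f"div.u64 {filter_keyword(inst[1])}, {filter_keyword(inst[2])}, {filter_keyword(inst[3])};"
--         case "mod":
--             return f"rem.u64 {filter_keyword(inst[1])}, {filter_keyword(inst[2])}, {filter_keyword(inst[3])};"
--         case "lsh":
--             return f"shl.u64 {filter_keyword(inst[1])}, {filter_keyword(inst[2])}, {filter_keyword(inst[3])};"
--         case "rsh":
--             return f"shr.u64 {filter_keyword(inst[1])}, {filter_keyword(inst[2])}, {filter_keyword(inst[3])};"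
--         # Memory Instructions
--         case "SAVE":
--             contents = (filter_keyword(reg) for reg in inst[2:])
--             contents = ", ".join(contents)
--             return f"SAVE [ {inst[1]} ] {{ { contents } }}" # just return everything
--         # Other Instructions
--         case "mov":
--             return f"mov.u64 {filter_keyword(inst[1])}, {filter_keyword(inst[2])};"
--         case "clock":
--             return f"mov.u64 {filter_keyword(inst[1])}, %clock64;"
--         case "time":
--             return f"mov.u64 {filter_keyword(inst[1])}, %globaltimer;"
--         case "cuid":
--             return f"""{{
--                 .reg .b32 %tmp;
--                 mov.u32 %tmp, %smid;
--                 cvt.u64.u32 {filter_keyword(inst[1])}, %tmp;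
--             }}"""
--         case _:
--             raise NotImplementedError(f"{inst} not yet supported")
-- ===== SOURCE B (Python) =====
-- # B: a one-pass template interpreter.  Each opcode maps to a template string; a single
-- # renderer scans the template char by char and expands placeholders:
-- #   {{ / }}  -> literal brace
-- #   {n}      -> filter_keyword(inst[n])
-- #   {n!}     -> inst[n] verbatim (no keyword filtering)
-- #   {n*}     -> ", ".join(filter_keyword(r) for r in inst[n:])
-- TEMPLATES = {
--     "add":   "add.u64 {1}, {2}, {3};",
--     "sub":   "sub.u64 {1}, {2}, {3};",
--     "mul":   "mul.u64 {1}, {2}, {3};",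
--     "div":   "div.u64 {1}, {2}, {3};",
--     "mod":   "rem.u64 {1}, {2}, {3};",
--     "lsh":   "shl.u64 {1}, {2}, {3};",
--     "rsh":   "shr.u64 {1}, {2}, {3};",
--     "SAVE":  "SAVE [ {1!} ] {{ {2*} }}",
--     "mov":   "mov.u64 {1}, {2};",
--     "clock": "mov.u64 {1}, %clock64;",
--     "time":  "mov.u64 {1}, %globaltimer;",
--     "cuid":  "{{\n                .reg .b32 %tmp;\n                mov.u32 %tmp, %smid;\n                cvt.u64.u32 {1}, %tmp;\n            }}",
-- }
--
-- def filter_keyword(reg: str) -> str: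
--     if reg in {"ADDR", "BYTES", "OUT", "IN1", "IN2", "IN3", "IN4"}:
--         return reg
--     return "%" + reg
--
-- def _render(tmpl: str, inst: list[str]) -> str:
--     out = []
--     i = 0
--     while i < len(tmpl):
--         c = tmpl[i]
--         if tmpl[i:i+2] == "{{":
--             out.append("{"); i += 2
--         elif tmpl[i:i+2] == "}}":
--             out.append("}"); i += 2
--         elif c == "{":
--             n = int(tmpl[i+1])
--             if tmpl[i+2] == "}":
--                 out.append(filter_keyword(inst[n])); i += 3
--             elif tmpl[i+2] == "!":
--                 out.append(inst[n]); i += 4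
--             else:  # '*'
--                 out.append(", ".join(filter_keyword(r) for r in inst[n:])); i += 4
--         else:
--             out.append(c); i += 1
--     return "".join(out)
--
-- def cvt_inst(inst: list[str]) -> str:
--     if inst[0] not in TEMPLATES:
--         raise NotImplementedError(f"{inst} not yet supported")
--     return _render(TEMPLATES[inst[0]], inst)
-- ===== Notes on version B (the rewrite author's own statement) =====
-- stated objective: alternative
-- what changed: Replaces A's twelve-arm match with one literal f-string per opcode by a data-driven template interpreter: a table maps each opcode to a template string, and a single character-scanning renderer expands {n}/{n!}/{n*}/{{ placeholders into the output.
import Mathlib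
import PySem

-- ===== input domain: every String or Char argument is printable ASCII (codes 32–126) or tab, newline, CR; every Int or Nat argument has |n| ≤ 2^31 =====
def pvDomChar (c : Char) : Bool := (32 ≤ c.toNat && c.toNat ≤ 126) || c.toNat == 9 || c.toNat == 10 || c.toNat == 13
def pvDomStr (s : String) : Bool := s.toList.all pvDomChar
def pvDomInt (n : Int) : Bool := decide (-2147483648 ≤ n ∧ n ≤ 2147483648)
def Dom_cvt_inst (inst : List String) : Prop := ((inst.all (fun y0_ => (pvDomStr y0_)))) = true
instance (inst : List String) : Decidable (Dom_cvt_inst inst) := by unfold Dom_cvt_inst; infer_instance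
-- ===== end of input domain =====

-- B replaces A's twelve-arm match of per-opcode f-strings by a tiny template interpreter: each
-- opcode maps to a template string and ONE renderer scans it char by char, expanding
-- {{ }} {n} {n!} {n*} placeholders; equivalence is about the return value only.

-- ===== PORT A =====
def filter_keyword (reg : String) : String :=
  if PySem.Set.contains (PySem.Set.ofList ["ADDR", "BYTES", "OUT", "IN1", "IN2", "IN3", "IN4"]) reg then
    reg
  else
    "%" ++ reg

-- inst[i] for the branches below; Pre_ keeps every used index in range, so getD "" is never hit there
def instGetA (inst : List String) (i : Int) : String :=
  (PySem.List.pyGet? inst i).getD ""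

def cvt_inst (inst : List String) : String :=
  match instGetA inst 0 with
  | "add" => "add.u64 " ++ filter_keyword (instGetA inst 1) ++ ", " ++ filter_keyword (instGetA inst 2) ++ ", " ++ filter_keyword (instGetA inst 3) ++ ";"
  | "sub" => "sub.u64 " ++ filter_keyword (instGetA inst 1) ++ ", " ++ filter_keyword (instGetA inst 2) ++ ", " ++ filter_keyword (instGetA inst 3) ++ ";"
  | "mul" => "mul.u64 " ++ filter_keyword (instGetA inst 1) ++ ", " ++ filter_keyword (instGetA inst 2) ++ ", " ++ filter_keyword (instGetA inst 3) ++ ";"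
  | "div" => "div.u64 " ++ filter_keyword (instGetA inst 1) ++ ", " ++ filter_keyword (instGetA inst 2) ++ ", " ++ filter_keyword (instGetA inst 3) ++ ";"
  | "mod" => "rem.u64 " ++ filter_keyword (instGetA inst 1) ++ ", " ++ filter_keyword (instGetA inst 2) ++ ", " ++ filter_keyword (instGetA inst 3) ++ ";"
  | "lsh" => "shl.u64 " ++ filter_keyword (instGetA inst 1) ++ ", " ++ filter_keyword (instGetA inst 2) ++ ", " ++ filter_keyword (instGetA inst 3) ++ ";"
  | "rsh" => "shr.u64 " ++ filter_keyword (instGetA inst 1) ++ ", " ++ filter_keyword (instGetA inst 2) ++ ", " ++ filter_keyword (instGetA inst 3) ++ ";"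
  | "SAVE" =>
      let contents := PySem.Str.join ", " ((PySem.List.slice inst (some 2) none).map filter_keyword)
      "SAVE [ " ++ instGetA inst 1 ++ " ] { " ++ contents ++ " }"
  | "mov" => "mov.u64 " ++ filter_keyword (instGetA inst 1) ++ ", " ++ filter_keyword (instGetA inst 2) ++ ";"
  | "clock" => "mov.u64 " ++ filter_keyword (instGetA inst 1) ++ ", %clock64;"
  | "time" => "mov.u64 " ++ filter_keyword (instGetA inst 1) ++ ", %globaltimer;"
  | "cuid" => "{\n                .reg .b32 %tmp;\n                mov.u32 %tmp, %smid;\n                cvt.u64.u32 " ++ filter_keyword (instGetA inst 1) ++ ", %tmp;\n            }"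
  | _ => ""  -- Python raises NotImplementedError here; excluded by Pre_

-- ===== PORT B =====
def bTEMPLATES : PySem.Dict String String :=
  PySem.Dict.ofList
    [("add",   "add.u64 {1}, {2}, {3};"),
     ("sub",   "sub.u64 {1}, {2}, {3};"),
     ("mul",   "mul.u64 {1}, {2}, {3};"),
     ("div",   "div.u64 {1}, {2}, {3};"),
     ("mod",   "rem.u64 {1}, {2}, {3};"),
     ("lsh",   "shl.u64 {1}, {2}, {3};"),
     ("rsh",   "shr.u64 {1}, {2}, {3};"),
     ("SAVE",  "SAVE [ {1!} ] {{ {2*} }}"),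
     ("mov",   "mov.u64 {1}, {2};"),
     ("clock", "mov.u64 {1}, %clock64;"),
     ("time",  "mov.u64 {1}, %globaltimer;"),
     ("cuid",  "{{\n                .reg .b32 %tmp;\n                mov.u32 %tmp, %smid;\n                cvt.u64.u32 {1}, %tmp;\n            }}")]

def filter_keyword_b (reg : String) : String :=
  if PySem.Set.contains (PySem.Set.ofList ["ADDR", "BYTES", "OUT", "IN1", "IN2", "IN3", "IN4"]) reg then
    reg
  else
    "%" ++ reg

-- inst[n]; Pre_ keeps every index a template uses in range, so getD "" is never hit there
def bGet (inst : List String) (n : Int) : String := (PySem.List.pyGet? inst n).getD ""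

-- _render: one pass over the template's chars, expanding {{, }}, {n}, {n!}, {n*}
def renderB (tmpl : List Char) (inst : List String) : List Char :=
  match tmpl with
  | [] => []
  | '{' :: '{' :: r => '{' :: renderB r inst
  | '}' :: '}' :: r => '}' :: renderB r inst
  | '{' :: d :: m :: r =>
      if m = '}' then
        (filter_keyword_b (bGet inst ((d.toNat - 48 : Nat) : Int))).toList ++ renderB r inst
      else if m = '!' then
        (bGet inst ((d.toNat - 48 : Nat) : Int)).toList ++ renderB (r.drop 1) inst
      else -- '*'
        (PySem.Str.join ", " ((PySem.List.slice inst (some ((d.toNat - 48 : Nat) : Int)) none).map filter_keyword_b)).toList ++ renderB (r.drop 1) inst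
  | c :: r => c :: renderB r inst
  termination_by tmpl.length
  decreasing_by all_goals (simp only [List.length_drop, List.length_cons]; omega)

def cvt_inst_alt (inst : List String) : String :=
  match PySem.Dict.get? bTEMPLATES ((PySem.List.pyGet? inst 0).getD "") with
  | some t => String.ofList (renderB t.toList inst)
  | none => ""  -- Python raises NotImplementedError here; excluded by Pre_

-- ===== PRECONDITION & SPEC =====
-- Pre_ = exactly where A returns: a known opcode with enough operands (else IndexError or NotImplementedError)
def Pre_cvt_inst (inst : List String) : Prop :=
  ((inst.head? = some "add" ∨ inst.head? = some "sub" ∨ inst.head? = some "mul" ∨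
    inst.head? = some "div" ∨ inst.head? = some "mod" ∨ inst.head? = some "lsh" ∨
    inst.head? = some "rsh") ∧ 4 ≤ inst.length) ∨
  (inst.head? = some "mov" ∧ 3 ≤ inst.length) ∨
  ((inst.head? = some "clock" ∨ inst.head? = some "time" ∨ inst.head? = some "cuid" ∨
    inst.head? = some "SAVE") ∧ 2 ≤ inst.length)

instance (inst : List String) : Decidable (Pre_cvt_inst inst) := by unfold Pre_cvt_inst; infer_instance

def pvWitness_cvt_inst : List String := ["add", "a", "b", "c"]

def Spec_cvt_inst (inst : List String) (out : String) : Prop := out = cvt_inst_alt inst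
instance (inst : List String) (out : String) : Decidable (Spec_cvt_inst inst out) := by unfold Spec_cvt_inst; infer_instance

-- ===== CLAIM (what is proved, stated in full; the proofs are below) =====
def Claim_equal_cvt_inst : Prop := ∀ (inst : List String), Dom_cvt_inst inst → Pre_cvt_inst inst → Spec_cvt_inst inst (cvt_inst inst)

-- ===== LEMMAS AND PROOFS =====
theorem fkb_eq : filter_keyword_b = filter_keyword := rfl

theorem pv_len3 {α : Type} (l : List α) (h : 3 ≤ l.length) : ∃ a b c r, l = a :: b :: c :: r := by
  match l, h with
  | a :: b :: c :: r, _ => exact ⟨a, b, c, r, rfl⟩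

theorem pv_len2 {α : Type} (l : List α) (h : 2 ≤ l.length) : ∃ a b r, l = a :: b :: r := by
  match l, h with
  | a :: b :: r, _ => exact ⟨a, b, r, rfl⟩

theorem pv_len1 {α : Type} (l : List α) (h : 1 ≤ l.length) : ∃ a r, l = a :: r := by
  match l, h with
  | a :: r, _ => exact ⟨a, r, rfl⟩

-- ===== VERDICT (by name: the statement is the Claim_ definition above) =====
set_option maxHeartbeats 2000000 in
theorem cvt_inst_spec : Claim_equal_cvt_inst := by
  intro inst _ pre
  unfold Spec_cvt_inst
  cases inst with
  | nil => simp [Pre_cvt_inst] at pre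
  | cons op rest =>
    rcases pre with ⟨hops, hlen⟩ | ⟨hop, hlen⟩ | ⟨hops, hlen⟩
    · simp only [List.head?_cons, Option.some.injEq] at hops
      simp only [List.length_cons] at hlen
      obtain ⟨a, b, c, r, rfl⟩ := pv_len3 rest (by omega)
      rcases hops with rfl | rfl | rfl | rfl | rfl | rfl | rfl <;>
        (simp only [cvt_inst, cvt_inst_alt, instGetA]
         simp only [pysem, PySem.List.pyGet?_zero_cons, Option.getD_some]
         rw [show PySem.Dict.get? bTEMPLATES _ = some _ from rfl]
         apply String.toList_inj.mp
         simp [renderB, bGet, fkb_eq, String.toList_append]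
         simp [pysem])
    · simp only [List.head?_cons, Option.some.injEq] at hop
      simp only [List.length_cons] at hlen
      obtain ⟨a, b, r, rfl⟩ := pv_len2 rest (by omega)
      subst hop
      simp only [cvt_inst, cvt_inst_alt, instGetA]
      simp only [pysem, PySem.List.pyGet?_zero_cons, Option.getD_some]
      rw [show PySem.Dict.get? bTEMPLATES "mov" = some "mov.u64 {1}, {2};" from rfl]
      apply String.toList_inj.mp
      simp [renderB, bGet, fkb_eq, String.toList_append]
      simp [pysem]
    · simp only [List.head?_cons, Option.some.injEq] at hops
      simp only [List.length_cons] at hlen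
      obtain ⟨a, r, rfl⟩ := pv_len1 rest (by omega)
      rcases hops with rfl | rfl | rfl | rfl <;>
        (simp only [cvt_inst, cvt_inst_alt, instGetA]
         simp only [pysem, PySem.List.pyGet?_zero_cons, Option.getD_some]
         rw [show PySem.Dict.get? bTEMPLATES _ = some _ from rfl]
         apply String.toList_inj.mp
         simp [renderB, bGet, fkb_eq, String.toList_append]
         try simp [pysem])
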